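-- pv_equiv track=rewrite | github.com/arknave/project-euler | python/pe749.py | nps
-- ===== SOURCE A (Python) =====
-- INF = 10**17
--
-- MAXK = 56
--
-- def dig_sum(x, k):
--     """Return the sum of the k-th powers of the digits of x"""
--     v = 0
--     while x > 0:
--         d = x % 10
--         v += d ** k
--         x //= 10
--
--         if v >= INF:
--             return INF
--
--     return v
--
-- def nps(x):
--     """Is x a near power sum?"""
--     for k in range(1, MAXK):
--         ds = dig_sum(x, k)
--         if ds == x - 1 or ds == x + 1:
--             return True
--         if ds > x + 1:
--             break
--
--     return False
-- ===== SOURCE B (Python) =====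
-- INF = 10**17
--
-- MAXK = 56
--
-- def nps(x):
--     """Is x a near power sum?"""
--     digs = []
--     t = x
--     while t > 0:
--         digs.append(t % 10)
--         t //= 10
--
--     def s(k):
--         v = 0
--         for d in digs:
--             v += d ** k
--             if v >= INF:
--                 return INF
--         return v
--
--     def hits(target):
--         # s(k) is nondecreasing in k (digits are 0..9), so binary-search the
--         # first exponent in [1, MAXK) whose power sum reaches target, then
--         # test it for equality.
--         lo, hi = 1, MAXK
--         while lo < hi:
--             mid = (lo + hi) // 2
--             if s(mid) >= target:
--                 hi = mid
--             else:
--                 lo = mid + 1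
--         return lo < MAXK and s(lo) == target
--
--     return hits(x - 1) or hits(x + 1)
-- ===== Notes on version B (the rewrite author's own statement) =====
-- stated objective: alternative
-- what changed: B extracts the digits once and replaces A's linear scan over all exponents (with its break) by two binary searches over the exponent axis, exploiting that the capped digit-power sum is nondecreasing in k: it searches the first exponent whose power sum reaches x-1 (resp. x+1) and tests it for equality.
import Mathlib
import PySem

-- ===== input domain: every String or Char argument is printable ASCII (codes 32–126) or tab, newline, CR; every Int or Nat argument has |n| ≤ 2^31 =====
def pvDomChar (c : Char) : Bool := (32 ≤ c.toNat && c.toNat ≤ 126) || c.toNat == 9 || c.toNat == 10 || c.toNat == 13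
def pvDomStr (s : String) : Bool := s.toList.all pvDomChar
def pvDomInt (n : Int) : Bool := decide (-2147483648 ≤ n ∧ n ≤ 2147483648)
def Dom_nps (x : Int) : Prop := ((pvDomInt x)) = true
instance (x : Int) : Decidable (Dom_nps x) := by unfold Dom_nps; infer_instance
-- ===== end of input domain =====

-- B extracts the digits once and replaces A's linear exponent scan (with its break)
-- by two binary searches over the exponent axis, using that the capped power sum is
-- nondecreasing in k (objective: alternative algorithm).

-- ===== PORT A =====
def pvINF : Int := 10 ^ 17

-- termination helper for the 'while x > 0: ... x //= 10' loops (cited by decreasing_by)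
theorem pvFloordivTen_lt (x : Int) (h : 0 < x) :
    (PySem.Int.floordiv x 10).toNat < x.toNat := by
  rw [PySem.Int.floordiv_eq_ediv_of_pos (by norm_num)]
  omega

-- the while-loop of dig_sum; v is the running sum.  k ported as Nat exponent:
-- exact, since every k passed comes from range(1, MAXK) so k ≥ 1.
def digSumGo (x : Int) (k : Nat) (v : Int) : Int :=
  if h : 0 < x then
    let d := PySem.Int.mod x 10
    let v' := v + d ^ k
    if pvINF ≤ v' then pvINF
    else digSumGo (PySem.Int.floordiv x 10) k v'
  else v
termination_by x.toNat
decreasing_by exact pvFloordivTen_lt x h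

-- the for-k loop of nps with its early return / break
def npsLoop (x : Int) : List Int → Bool
  | [] => false
  | k :: ks =>
    let ds := digSumGo x k.toNat 0
    if ds = x - 1 ∨ ds = x + 1 then true
    else if x + 1 < ds then false
    else npsLoop x ks

def nps (x : Int) : Bool := npsLoop x (PySem.List.pyRange 1 56 1)

-- ===== PORT B =====
-- 'digs = []; while t > 0: digs.append(t % 10); t //= 10'
def buildDigs (t : Int) : List Int :=
  if h : 0 < t then PySem.Int.mod t 10 :: buildDigs (PySem.Int.floordiv t 10)
  else []
termination_by t.toNat
decreasing_by exact pvFloordivTen_lt t h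

-- 's(k)': the for-d loop with its INF early return
def sGo (digs : List Int) (k : Nat) (v : Int) : Int :=
  match digs with
  | [] => v
  | d :: ds =>
    let v' := v + d ^ k
    if pvINF ≤ v' then pvINF else sGo ds k v'

-- 'while lo < hi: mid = (lo+hi)//2; ...' (lo, hi stay in [1,56], so Nat is exact)
def bsLoop (digs : List Int) (t : Int) (lo hi : Nat) : Nat :=
  if lo < hi then
    let mid := (lo + hi) / 2
    if t ≤ sGo digs mid 0 then bsLoop digs t lo mid
    else bsLoop digs t (mid + 1) hi
  else lo
termination_by hi - lo
decreasing_by all_goals omega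

-- 'return lo < MAXK and s(lo) == target'
def hits (digs : List Int) (target : Int) : Bool :=
  let lo := bsLoop digs target 1 56
  decide (lo < 56) && decide (sGo digs lo 0 = target)

def nps_alt (x : Int) : Bool :=
  let digs := buildDigs x
  hits digs (x - 1) || hits digs (x + 1)

-- ===== PRECONDITION & SPEC =====
def Spec_nps (x : Int) (out : Bool) : Prop := out = nps_alt x
instance (x : Int) (out : Bool) : Decidable (Spec_nps x out) := by unfold Spec_nps; infer_instance

-- ===== CLAIM (what is proved, stated in full; the proofs are below) =====
def Claim_equal_nps : Prop := ∀ (x : Int), Dom_nps x → Spec_nps x (nps x)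

-- ===== LEMMAS AND PROOFS =====

theorem buildDigs_nonneg (x : Int) : ∀ d ∈ buildDigs x, 0 ≤ d := by
  induction x using buildDigs.induct with
  | case1 x h ih =>
    rw [buildDigs, dif_pos h]
    intro d hd
    rcases List.mem_cons.mp hd with hd | hd
    · subst hd
      rw [PySem.Int.mod_eq_emod_of_pos (by norm_num)]; omega
    · exact ih d hd
  | case2 x h => rw [buildDigs, dif_neg h]; intro d hd; simp at hd

def pvPowSum (digs : List Int) (k : Nat) : Int := (digs.map (· ^ k)).sum

theorem pvPowSum_nonneg (digs : List Int) (hnn : ∀ d ∈ digs, 0 ≤ d) (k : Nat) :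
    0 ≤ pvPowSum digs k := by
  apply List.sum_nonneg
  intro a ha
  simp only [List.mem_map] at ha
  obtain ⟨d, hd, rfl⟩ := ha
  exact pow_nonneg (hnn d hd) k

-- A's dig_sum loop computes the capped power sum of the digit list of x
theorem digSumGo_eq (x : Int) (k : Nat) :
    ∀ v : Int, v < pvINF →
      digSumGo x k v = if pvINF ≤ v + pvPowSum (buildDigs x) k then pvINF
                       else v + pvPowSum (buildDigs x) k := by
  induction x using buildDigs.induct with
  | case1 x h ih =>
    intro v hv
    have hd0 : 0 ≤ PySem.Int.mod x 10 := by
      rw [PySem.Int.mod_eq_emod_of_pos (by norm_num)]; omega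
    have hdk : 0 ≤ PySem.Int.mod x 10 ^ k := pow_nonneg hd0 k
    have hpsn := pvPowSum_nonneg (buildDigs (PySem.Int.floordiv x 10))
      (buildDigs_nonneg _) k
    have hps : pvPowSum (buildDigs x) k
        = (PySem.Int.mod x 10) ^ k + pvPowSum (buildDigs (PySem.Int.floordiv x 10)) k := by
      unfold pvPowSum
      rw [buildDigs, dif_pos h]
      simp
    rw [digSumGo, dif_pos h]
    simp only []
    by_cases h1 : pvINF ≤ v + PySem.Int.mod x 10 ^ k
    · rw [if_pos h1, if_pos (by rw [hps]; omega)]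
    · rw [if_neg h1, ih _ (by omega), hps]
      split_ifs <;> omega
  | case2 x h =>
    intro v hv
    rw [digSumGo, dif_neg h]
    have hps : pvPowSum (buildDigs x) k = 0 := by
      unfold pvPowSum; rw [buildDigs, dif_neg h]; simp
    rw [hps, if_neg (by omega)]; omega

-- B's s(k) loop computes the same capped power sum
theorem sGo_eq (digs : List Int) (hnn : ∀ d ∈ digs, 0 ≤ d) (k : Nat) :
    ∀ v : Int, v < pvINF →
      sGo digs k v = if pvINF ≤ v + pvPowSum digs k then pvINF
                     else v + pvPowSum digs k := by
  induction digs with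
  | nil =>
    intro v hv
    have : pvPowSum [] k = 0 := by simp [pvPowSum]
    rw [sGo, this, if_neg (by omega)]; omega
  | cons d ds ih =>
    intro v hv
    have hd0 : 0 ≤ d := hnn d List.mem_cons_self
    have hdk : 0 ≤ d ^ k := pow_nonneg hd0 k
    have hnn' : ∀ e ∈ ds, 0 ≤ e := fun e he => hnn e (List.mem_cons_of_mem d he)
    have hpsn := pvPowSum_nonneg ds hnn' k
    have hps : pvPowSum (d :: ds) k = d ^ k + pvPowSum ds k := by
      unfold pvPowSum; simp
    rw [sGo]
    by_cases h1 : pvINF ≤ v + d ^ k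
    · rw [if_pos h1, if_pos (by rw [hps]; omega)]
    · rw [if_neg h1, ih hnn' _ (by omega), hps]
      split_ifs <;> omega

theorem digSumGo_eq_sGo (x : Int) (k : Nat) :
    digSumGo x k 0 = sGo (buildDigs x) k 0 := by
  rw [digSumGo_eq x k 0 (by norm_num [pvINF]),
      sGo_eq (buildDigs x) (buildDigs_nonneg x) k 0 (by norm_num [pvINF])]

-- exponent monotonicity of a digit power (digits are ≥ 0; exponents ≥ 1)
theorem pvPow_mono (d : Int) (hd : 0 ≤ d) {k k' : Nat} (hk : 1 ≤ k) (hkk : k ≤ k') :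
    d ^ k ≤ d ^ k' := by
  rcases eq_or_lt_of_le hd with h0 | h0
  · rw [← h0, zero_pow (by omega), zero_pow (by omega)]
  · rcases Int.lt_iff_add_one_le.mp h0 with h1
    by_cases hd1 : 1 ≤ d
    · exact pow_le_pow_right₀ hd1 hkk
    · omega

theorem pvPowSum_mono (digs : List Int) (hnn : ∀ d ∈ digs, 0 ≤ d)
    {k k' : Nat} (hk : 1 ≤ k) (hkk : k ≤ k') :
    pvPowSum digs k ≤ pvPowSum digs k' := by
  induction digs with
  | nil => simp [pvPowSum]
  | cons d ds ih =>
    have h1 : pvPowSum (d :: ds) k = d ^ k + pvPowSum ds k := by unfold pvPowSum; simp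
    have h2 : pvPowSum (d :: ds) k' = d ^ k' + pvPowSum ds k' := by unfold pvPowSum; simp
    have h3 := pvPow_mono d (hnn d List.mem_cons_self) hk hkk
    have h4 := ih (fun e he => hnn e (List.mem_cons_of_mem d he))
    omega

theorem sGo_mono (digs : List Int) (hnn : ∀ d ∈ digs, 0 ≤ d)
    {k k' : Nat} (hk : 1 ≤ k) (hkk : k ≤ k') :
    sGo digs k 0 ≤ sGo digs k' 0 := by
  rw [sGo_eq digs hnn k 0 (by norm_num [pvINF]), sGo_eq digs hnn k' 0 (by norm_num [pvINF])]
  have := pvPowSum_mono digs hnn hk hkk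
  split_ifs <;> omega

-- the binary-search invariant: the result r keeps every exponent below it strictly
-- under the target and every exponent from it on at or above the target
theorem bsLoop_spec (digs : List Int) (hnn : ∀ d ∈ digs, 0 ≤ d) (t : Int) :
    ∀ (n lo hi : Nat), hi - lo ≤ n → 1 ≤ lo → lo ≤ hi → hi ≤ 56 →
      (∀ j, 1 ≤ j → j < lo → sGo digs j 0 < t) →
      (∀ j, hi ≤ j → j < 56 → t ≤ sGo digs j 0) →
      lo ≤ bsLoop digs t lo hi ∧ bsLoop digs t lo hi ≤ hi ∧
      (∀ j, 1 ≤ j → j < bsLoop digs t lo hi → sGo digs j 0 < t) ∧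
      (∀ j, bsLoop digs t lo hi ≤ j → j < 56 → t ≤ sGo digs j 0) := by
  intro n
  induction n with
  | zero =>
    intro lo hi hfuel h1 hlh h56 hlow hhigh
    have hle : ¬ lo < hi := by omega
    rw [bsLoop, if_neg hle]
    exact ⟨le_refl _, hlh, hlow, fun j hj hj56 => hhigh j (by omega) hj56⟩
  | succ n ih =>
    intro lo hi hfuel h1 hlh h56 hlow hhigh
    by_cases hlt : lo < hi
    · rw [bsLoop, if_pos hlt]
      simp only []
      have hmid1 : lo ≤ (lo + hi) / 2 := by omega
      have hmid2 : (lo + hi) / 2 < hi := by omega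
      by_cases hcmp : t ≤ sGo digs ((lo + hi) / 2) 0
      · rw [if_pos hcmp]
        have hup : ∀ j, (lo + hi) / 2 ≤ j → j < 56 → t ≤ sGo digs j 0 := by
          intro j hj hj56
          calc t ≤ sGo digs ((lo + hi) / 2) 0 := hcmp
            _ ≤ sGo digs j 0 := sGo_mono digs hnn (by omega) hj
        obtain ⟨a, b, c, d⟩ := ih lo ((lo + hi) / 2) (by omega) h1 hmid1 (by omega) hlow hup
        exact ⟨a, by omega, c, d⟩
      · rw [if_neg hcmp]
        have hdown : ∀ j, 1 ≤ j → j < (lo + hi) / 2 + 1 → sGo digs j 0 < t := by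
          intro j hj hjm
          calc sGo digs j 0 ≤ sGo digs ((lo + hi) / 2) 0 := sGo_mono digs hnn hj (by omega)
            _ < t := by omega
        obtain ⟨a, b, c, d⟩ := ih ((lo + hi) / 2 + 1) hi (by omega) (by omega) (by omega) h56 hdown hhigh
        exact ⟨by omega, b, c, d⟩
    · rw [bsLoop, if_neg hlt]
      exact ⟨le_refl _, hlh, hlow, fun j hj hj56 => hhigh j (by omega) hj56⟩

-- hits digs t decides 'some exponent in [1,56) has capped power sum exactly t'
theorem hits_iff (digs : List Int) (hnn : ∀ d ∈ digs, 0 ≤ d) (t : Int) :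
    hits digs t = true ↔ ∃ k : Nat, 1 ≤ k ∧ k < 56 ∧ sGo digs k 0 = t := by
  obtain ⟨hr1, hr2, hlow, hhigh⟩ :=
    bsLoop_spec digs hnn t 55 1 56 (by omega) (by omega) (by omega) (by omega)
      (by intro j hj hj'; omega) (by intro j hj hj'; omega)
  unfold hits
  simp only [Bool.and_eq_true, decide_eq_true_eq]
  constructor
  · rintro ⟨hlt, heq⟩
    exact ⟨bsLoop digs t 1 56, hr1, hlt, heq⟩
  · rintro ⟨k, hk1, hk56, hk⟩
    have hrk : bsLoop digs t 1 56 ≤ k := by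
      by_contra h
      have := hlow k hk1 (by omega)
      omega
    have hlt : bsLoop digs t 1 56 < 56 := by omega
    have h5 : t ≤ sGo digs (bsLoop digs t 1 56) 0 := hhigh _ (le_refl _) hlt
    have h6 : sGo digs (bsLoop digs t 1 56) 0 ≤ sGo digs k 0 :=
      sGo_mono digs hnn hr1 hrk
    exact ⟨hlt, by omega⟩

-- A's loop over a sorted exponent list decides the same existential
theorem npsLoop_iff (x : Int) (ks : List Int)
    (h1 : ∀ k ∈ ks, 1 ≤ k) (hsort : ks.Pairwise (· ≤ ·)) :
    npsLoop x ks = true ↔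
      ∃ k ∈ ks, sGo (buildDigs x) k.toNat 0 = x - 1 ∨ sGo (buildDigs x) k.toNat 0 = x + 1 := by
  induction ks with
  | nil => simp [npsLoop]
  | cons k ks ih =>
    have hk1 : 1 ≤ k := h1 k List.mem_cons_self
    have h1' : ∀ k' ∈ ks, 1 ≤ k' := fun k' hk' => h1 k' (List.mem_cons_of_mem k hk')
    have hpair := List.pairwise_cons.mp hsort
    rw [npsLoop]
    simp only [digSumGo_eq_sGo]
    by_cases hP : sGo (buildDigs x) k.toNat 0 = x - 1 ∨ sGo (buildDigs x) k.toNat 0 = x + 1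
    · rw [if_pos hP]
      constructor
      · intro _; exact ⟨k, List.mem_cons_self, hP⟩
      · intro _; rfl
    · rw [if_neg hP]
      by_cases hbr : x + 1 < sGo (buildDigs x) k.toNat 0
      · rw [if_pos hbr]
        constructor
        · intro h; exact absurd h (by simp)
        · rintro ⟨k', hk', hP'⟩
          rcases List.mem_cons.mp hk' with rfl | hk'
          · exact (hP hP').elim
          · have hle : k ≤ k' := hpair.1 k' hk'
            have hmono : sGo (buildDigs x) k.toNat 0 ≤ sGo (buildDigs x) k'.toNat 0 :=
              sGo_mono (buildDigs x) (buildDigs_nonneg x) (by omega) (by omega)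
            omega
      · rw [if_neg hbr, ih h1' hpair.2]
        constructor
        · rintro ⟨k', hk', hP'⟩; exact ⟨k', List.mem_cons_of_mem k hk', hP'⟩
        · rintro ⟨k', hk', hP'⟩
          rcases List.mem_cons.mp hk' with rfl | hk'
          · exact absurd hP' hP
          · exact ⟨k', hk', hP'⟩

-- bridge the Int exponent list of A with the Nat exponents of B's search
theorem exists_pyRange_iff (x : Int) :
    (∃ k ∈ PySem.List.pyRange 1 56 1,
        sGo (buildDigs x) k.toNat 0 = x - 1 ∨ sGo (buildDigs x) k.toNat 0 = x + 1) ↔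
      (∃ n : Nat, 1 ≤ n ∧ n < 56 ∧
        (sGo (buildDigs x) n 0 = x - 1 ∨ sGo (buildDigs x) n 0 = x + 1)) := by
  constructor
  · rintro ⟨k, hk, hP⟩
    rw [PySem.List.mem_pyRange_one] at hk
    exact ⟨k.toNat, by omega, by omega, hP⟩
  · rintro ⟨n, hn1, hn56, hP⟩
    refine ⟨(n : Int), ?_, ?_⟩
    · rw [PySem.List.mem_pyRange_one]; omega
    · simpa using hP

-- ===== VERDICT (by name: the statement is the Claim_ definition above) =====
theorem nps_spec : Claim_equal_nps := by
  intro x _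
  unfold Spec_nps nps nps_alt
  simp only []
  rw [Bool.eq_iff_iff]
  have hrange1 : ∀ k ∈ PySem.List.pyRange 1 56 1, (1 : Int) ≤ k := by
    intro k hk; rw [PySem.List.mem_pyRange_one] at hk; omega
  have hrange2 : (PySem.List.pyRange 1 56 1).Pairwise (· ≤ ·) :=
    (PySem.List.pairwise_lt_pyRange_one 1 56).imp (fun h => le_of_lt h)
  rw [npsLoop_iff x _ hrange1 hrange2, exists_pyRange_iff x]
  simp only [Bool.or_eq_true,
    hits_iff (buildDigs x) (buildDigs_nonneg x) (x - 1),
    hits_iff (buildDigs x) (buildDigs_nonneg x) (x + 1)]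
  constructor
  · rintro ⟨n, h1, h2, hP | hP⟩
    · exact Or.inl ⟨n, h1, h2, hP⟩
    · exact Or.inr ⟨n, h1, h2, hP⟩
  · rintro (⟨n, h1, h2, hP⟩ | ⟨n, h1, h2, hP⟩)
    · exact ⟨n, h1, h2, Or.inl hP⟩
    · exact ⟨n, h1, h2, Or.inr hP⟩
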